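-- pv_equiv track=rewrite | github.com/AarthiAnanth/SampleProject | DesignerPDFViewer.py | function
-- ===== SOURCE A (Python) =====
-- def function(h,word):
--     string='abcdefghijklmnopqrstuvwxyz'
--     list1=[]
--     for i in string:
--         list1.append(i)
--     max=0
--     for i in range(len(list1)):
--         for j in word:
--             if j==list1[i]:
--                 if max<h[i]:
--                     max=h[i]
--     return max*(len(word)*1)
-- ===== SOURCE B (Python) =====
-- def function(h, word):
--     m = 0
--     for c in word:
--         if 'a' <= c <= 'z':
--             v = h[ord(c) - 97]
--             if m < v:
--                 m = v
--     return m * len(word)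
-- ===== Notes on version B (the rewrite author's own statement) =====
-- stated objective: simpler
-- what changed: B replaces A's alphabet-list construction and 26xlen(word) nested scan by a single pass over the word, indexing h directly by ord(c)-ord('a') and keeping a running max.
import Mathlib
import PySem

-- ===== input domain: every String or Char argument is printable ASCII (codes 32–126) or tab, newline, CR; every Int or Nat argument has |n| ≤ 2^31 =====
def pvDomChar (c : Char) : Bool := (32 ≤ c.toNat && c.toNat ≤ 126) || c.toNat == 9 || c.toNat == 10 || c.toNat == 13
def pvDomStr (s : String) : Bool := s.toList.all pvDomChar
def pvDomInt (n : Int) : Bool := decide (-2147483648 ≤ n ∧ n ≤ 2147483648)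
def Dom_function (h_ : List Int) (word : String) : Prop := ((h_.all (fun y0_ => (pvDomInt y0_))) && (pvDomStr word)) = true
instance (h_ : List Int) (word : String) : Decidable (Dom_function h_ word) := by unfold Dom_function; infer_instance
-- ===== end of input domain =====

-- B replaces A's alphabet-list construction and 26×len(word) nested scan by a single
-- pass over the word, indexing h directly by ord(c)-ord('a') with a running max.

-- ===== PORT A =====
-- literal port of A: build list1 from the alphabet string by appending, then for each
-- index i of list1 scan the whole word, updating max when the char equals list1[i].
-- h[i] is ported as getD (Pre_function guarantees the index is in range where it is read).
def function (h_ : List Int) (word : String) : Int :=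
  let string := "abcdefghijklmnopqrstuvwxyz"
  let list1 := string.toList.foldl (fun acc i => acc ++ [i]) []
  let m := (List.range list1.length).foldl
    (fun m i =>
      word.toList.foldl
        (fun m j =>
          if j = list1.getD i ' ' then
            (if m < h_.getD i 0 then h_.getD i 0 else m)
          else m) m) 0
  m * ((PySem.Str.len word) * 1)

-- ===== PORT B =====
def function_alt (h_ : List Int) (word : String) : Int :=
  let m := word.toList.foldl
    (fun m c =>
      if 'a' ≤ c ∧ c ≤ 'z' then
        (let v := h_.getD (c.toNat - 97) 0; if m < v then v else m)
      else m) 0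
  m * (PySem.Str.len word)

-- ===== PRECONDITION & SPEC =====
-- A raises IndexError when the word contains a lowercase letter whose alphabet index
-- is ≥ len(h); B indexes h the same way, so both raise there.
def Pre_function (h_ : List Int) (word : String) : Prop :=
  (word.toList.all (fun c =>
    !(decide (97 ≤ c.toNat ∧ c.toNat ≤ 122)) || decide (c.toNat - 97 < h_.length))) = true
instance (h_ : List Int) (word : String) : Decidable (Pre_function h_ word) := by
  unfold Pre_function; infer_instance
def pvWitness_function : List Int × String := ([1, 2, 3], "cabba c!")

def Spec_function (h_ : List Int) (word : String) (out : Int) : Prop := out = function_alt h_ word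
instance (h_ : List Int) (word : String) (out : Int) : Decidable (Spec_function h_ word out) := by unfold Spec_function; infer_instance

-- ===== CLAIM (what is proved, stated in full; the proofs are below) =====
def Claim_equal_function : Prop := ∀ (h_ : List Int) (word : String), Dom_function h_ word → Pre_function h_ word → Spec_function h_ word (function h_ word)

-- ===== LEMMAS AND PROOFS =====

-- alphabet as a plain list
def pvAlpha : List Char := "abcdefghijklmnopqrstuvwxyz".toList

theorem pvAlpha_getD_toNat : ∀ i : Fin 26,
    (pvAlpha.getD i.val ' ').toNat = 97 + i.val ∧
    'a' ≤ pvAlpha.getD i.val ' ' ∧ pvAlpha.getD i.val ' ' ≤ 'z' := by decide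

-- the "if m < v then v else m" update is max
theorem pvUpd_eq_max (m v : Int) : (if m < v then v else m) = max m v := by
  rw [max_def]; split_ifs <;> omega

theorem pvFoldl_congr {α β : Type} (l : List α) (f g : β → α → β) (b : β)
    (h : ∀ m x, x ∈ l → f m x = g m x) : l.foldl f b = l.foldl g b := by
  induction l generalizing b with
  | nil => rfl
  | cons a t ih =>
    rw [List.foldl_cons, List.foldl_cons, h b a (List.mem_cons_self ..)]
    exact ih _ (fun m x hx => h m x (List.mem_cons_of_mem _ hx))

-- a conditional-max fold equals foldl max over the filterMapped value list
theorem pvFold_filterMap {α : Type} (P : α → Prop) [DecidablePred P] (v : α → Int)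
    (l : List α) (m : Int) :
    l.foldl (fun m x => if P x then max m (v x) else m) m
      = (l.filterMap (fun x => if P x then some (v x) else none)).foldl max m := by
  induction l generalizing m with
  | nil => rfl
  | cons a t ih => by_cases h : P a <;> simp [h, ih]

theorem pvLe_foldl_max (a : Int) (l : List Int) : a ≤ l.foldl max a := by
  induction l generalizing a with
  | nil => exact le_rfl
  | cons x t ih => exact le_trans (le_max_left a x) (ih _)

theorem pvMem_le_foldl_max (a x : Int) (l : List Int) (hx : x ∈ l) : x ≤ l.foldl max a := by
  induction l generalizing a with
  | nil => cases hx
  | cons y t ih =>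
    rcases List.mem_cons.mp hx with rfl | hx'
    · exact le_trans (le_max_right a x) (pvLe_foldl_max _ _)
    · exact ih _ hx'

theorem pvFoldl_max_cases (a : Int) (l : List Int) : l.foldl max a = a ∨ l.foldl max a ∈ l := by
  induction l generalizing a with
  | nil => exact Or.inl rfl
  | cons x t ih =>
    rw [List.foldl_cons]
    rcases ih (max a x) with h | h
    · rcases max_cases a x with ⟨he, _⟩ | ⟨he, _⟩
      · exact Or.inl (by rw [h, he])
      · exact Or.inr (by rw [h, he]; exact List.mem_cons_self ..)
    · exact Or.inr (List.mem_cons_of_mem _ h)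

theorem pvFoldl_max_le (a : Int) (l : List Int) (b : Int)
    (ha : a ≤ b) (hl : ∀ x ∈ l, x ≤ b) : l.foldl max a ≤ b := by
  rcases pvFoldl_max_cases a l with h | h
  · exact h.le.trans ha
  · exact hl _ h

-- foldl max depends only on the set of elements
theorem pvFoldl_max_ext (a : Int) (l l' : List Int)
    (hmem : ∀ x, x ∈ l ↔ x ∈ l') : l.foldl max a = l'.foldl max a := by
  apply le_antisymm
  · exact pvFoldl_max_le a l _ (pvLe_foldl_max a l')
      (fun x hx => pvMem_le_foldl_max a x l' ((hmem x).1 hx))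
  · exact pvFoldl_max_le a l' _ (pvLe_foldl_max a l)
      (fun x hx => pvMem_le_foldl_max a x l ((hmem x).2 hx))

-- A's inner scan of the word for letter c fixes the state to "max with v if c ∈ word"
theorem pvInner (w : List Char) (c : Char) (v m : Int) :
    w.foldl (fun m j => if j = c then (if m < v then v else m) else m) m
      = if c ∈ w then max m v else m := by
  induction w generalizing m with
  | nil => simp
  | cons a t ih =>
    rw [List.foldl_cons]
    by_cases h : a = c
    · subst h
      rw [if_pos rfl, pvUpd_eq_max, ih]
      by_cases hc : a ∈ t
      · simp [hc]
      · simp [hc]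
    · rw [if_neg h, ih]
      by_cases hct : c ∈ t <;> simp [hct, Ne.symm h]

theorem pvChar_toNat_inj {c d : Char} (h : c.toNat = d.toNat) : c = d := by
  apply Char.ext
  exact UInt32.toNat_inj.mp h

theorem pvChar_le_iff (c d : Char) : c ≤ d ↔ c.toNat ≤ d.toNat := by rfl

-- ===== VERDICT (by name: the statement is the Claim_ definition above) =====
theorem function_spec : Claim_equal_function := by
  intro h_ word _ _
  unfold Spec_function function function_alt
  have hlist : ("abcdefghijklmnopqrstuvwxyz".toList.foldl (fun acc i => acc ++ [i]) [])
      = pvAlpha := by decide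
  simp only [hlist]
  set w := word.toList with hw
  -- collapse A's inner word scan (pvInner) to a membership-guarded max over range 26
  have hA : (List.range pvAlpha.length).foldl
      (fun m i => w.foldl (fun m j =>
          if j = pvAlpha.getD i ' ' then (if m < h_.getD i 0 then h_.getD i 0 else m)
          else m) m) 0
      = (List.range 26).foldl
          (fun m i => if pvAlpha.getD i ' ' ∈ w then max m (h_.getD i 0) else m) 0 := by
    have hlen : pvAlpha.length = 26 := by decide
    rw [hlen]
    exact pvFoldl_congr _ _ _ _
      (fun m i _ => pvInner w (pvAlpha.getD i ' ') (h_.getD i 0) m)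
  rw [hA]
  -- rewrite B's fold update as max
  have hB : w.foldl (fun m c =>
        if 'a' ≤ c ∧ c ≤ 'z' then
          (let v := h_.getD (c.toNat - 97) 0; if m < v then v else m)
        else m) 0
      = w.foldl (fun m c =>
          if 'a' ≤ c ∧ c ≤ 'z' then max m (h_.getD (c.toNat - 97) 0) else m) 0 := by
    refine pvFoldl_congr _ _ _ _ (fun m c _ => ?_)
    by_cases hc : 'a' ≤ c ∧ c ≤ 'z' <;> simp [hc, pvUpd_eq_max]
  rw [hB]
  -- both folds as foldl max over value lists, equal as sets
  rw [pvFold_filterMap (fun i => pvAlpha.getD i ' ' ∈ w) (fun i => h_.getD i 0) (List.range 26) 0,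
      pvFold_filterMap (fun c => 'a' ≤ c ∧ c ≤ 'z') (fun c => h_.getD (c.toNat - 97) 0) w 0]
  have hmem : ∀ x : Int,
      x ∈ (List.range 26).filterMap (fun i => if pvAlpha.getD i ' ' ∈ w then some (h_.getD i 0) else none)
        ↔ x ∈ w.filterMap (fun c => if 'a' ≤ c ∧ c ≤ 'z' then some (h_.getD (c.toNat - 97) 0) else none) := by
    intro x
    rw [List.mem_filterMap, List.mem_filterMap]
    constructor
    · rintro ⟨i, hi, hx⟩
      rw [List.mem_range] at hi
      split_ifs at hx with hin
      · injection hx with hx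
        have ht : (pvAlpha.getD i ' ').toNat = 97 + i := (pvAlpha_getD_toNat ⟨i, hi⟩).1
        have hcr : 'a' ≤ pvAlpha.getD i ' ' ∧ pvAlpha.getD i ' ' ≤ 'z' :=
          (pvAlpha_getD_toNat ⟨i, hi⟩).2
        refine ⟨pvAlpha.getD i ' ', hin, ?_⟩
        rw [if_pos hcr]
        have hidx : (pvAlpha.getD i ' ').toNat - 97 = i := by omega
        rw [hidx, hx]
    · rintro ⟨c, hc, hx⟩
      split_ifs at hx with hcr
      · injection hx with hx
        have h97 : 97 ≤ c.toNat := (pvChar_le_iff 'a' c).mp hcr.1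
        have h122 : c.toNat ≤ 122 := (pvChar_le_iff c 'z').mp hcr.2
        have hi : c.toNat - 97 < 26 := by omega
        have ht : (pvAlpha.getD (c.toNat - 97) ' ').toNat = 97 + (c.toNat - 97) :=
          (pvAlpha_getD_toNat ⟨c.toNat - 97, hi⟩).1
        have hceq : pvAlpha.getD (c.toNat - 97) ' ' = c := pvChar_toNat_inj (by omega)
        refine ⟨c.toNat - 97, List.mem_range.mpr hi, ?_⟩
        rw [hceq, if_pos hc, hx]
  rw [pvFoldl_max_ext 0 _ _ hmem, mul_one]
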